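-- pv_equiv track=rewrite | github.com/shanayamalik/cs294-sp26 | backend/app/parser.py | _value_after
-- ===== SOURCE A (Python) =====
-- def _first_matching_line(lines: list[str], value: str) -> int | None:
--     expected = value.upper()
--     for index, line in enumerate(lines):
--         if line.strip().upper() == expected:
--             return index
--     return None
--
-- def _value_after(lines: list[str], label: str) -> str | None:
--     index = _first_matching_line(lines, label)
--     if index is None:
--         return None
--     for value in lines[index + 1 :]:
--         if value:
--             return value
--     return None
-- ===== SOURCE B (Python) =====
-- def _value_after(lines, label):
--     expected = label.upper()
--     found = False
--     for line in lines:
--         if found: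
--             if line:
--                 return line
--         elif line.strip().upper() == expected:
--             found = True
--     return None
-- ===== Notes on version B (the rewrite author's own statement) =====
-- stated objective: simpler
-- what changed: Replaces the find-index helper plus a second scan over the slice with one stateful pass carrying a 'found' flag, removing the helper, the index arithmetic and the slicing.
import Mathlib
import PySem

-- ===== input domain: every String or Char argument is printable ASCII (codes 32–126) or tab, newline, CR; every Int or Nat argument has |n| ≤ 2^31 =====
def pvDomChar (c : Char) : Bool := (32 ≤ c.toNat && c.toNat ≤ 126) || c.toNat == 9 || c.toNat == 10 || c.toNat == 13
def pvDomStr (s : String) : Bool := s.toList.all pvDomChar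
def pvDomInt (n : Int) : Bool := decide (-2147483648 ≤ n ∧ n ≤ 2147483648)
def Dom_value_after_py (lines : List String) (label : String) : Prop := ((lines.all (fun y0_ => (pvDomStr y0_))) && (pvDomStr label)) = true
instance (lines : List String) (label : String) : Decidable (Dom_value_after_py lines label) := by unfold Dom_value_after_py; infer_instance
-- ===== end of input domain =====

-- B replaces A's find-index-then-scan-slice pair with one single pass carrying a 'found' flag (objective: simpler).

-- ===== PORT A =====
-- _first_matching_line: enumerate loop, returning the first index whose stripped upper-cased line equals expected
def firstMatchingLineA (expected : String) : List String → Nat → Option Nat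
  | [], _ => none
  | line :: rest, index =>
    if PySem.Str.upper (PySem.Str.strip line) = expected then some index
    else firstMatchingLineA expected rest (index + 1)

-- the second loop of _value_after: first truthy (non-empty) value
def firstTruthyA : List String → Option String
  | [] => none
  | value :: rest => if value ≠ "" then some value else firstTruthyA rest

def value_after_py (lines : List String) (label : String) : Option String :=
  match firstMatchingLineA (PySem.Str.upper label) lines 0 with
  | none => none
  | some index => firstTruthyA (PySem.List.slice lines (some ((index : Int) + 1)) none)

-- ===== PORT B =====
def valueAfterGoB (expected : String) (found : Bool) : List String → Option String
  | [] => none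
  | line :: rest =>
    if found then
      if line ≠ "" then some line else valueAfterGoB expected true rest
    else if PySem.Str.upper (PySem.Str.strip line) = expected then
      valueAfterGoB expected true rest
    else
      valueAfterGoB expected false rest

def value_after_py_alt (lines : List String) (label : String) : Option String :=
  valueAfterGoB (PySem.Str.upper label) false lines

-- ===== PRECONDITION & SPEC =====
def Spec_value_after_py (lines : List String) (label : String) (out : Option String) : Prop := out = value_after_py_alt lines label
instance (lines : List String) (label : String) (out : Option String) : Decidable (Spec_value_after_py lines label out) := by unfold Spec_value_after_py; infer_instance

-- ===== CLAIM (what is proved, stated in full; the proofs are below) =====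
def Claim_equal_value_after_py : Prop := ∀ (lines : List String) (label : String), Dom_value_after_py lines label → Spec_value_after_py lines label (value_after_py lines label)

-- ===== LEMMAS AND PROOFS =====

theorem goB_true_eq_firstTruthy (e : String) (xs : List String) :
    valueAfterGoB e true xs = firstTruthyA xs := by
  induction xs with
  | nil => rfl
  | cons x rest ih => simp [valueAfterGoB, firstTruthyA, ih]

theorem firstMatchingLineA_shift (e : String) (xs : List String) (n : Nat) :
    firstMatchingLineA e xs (n + 1) = (firstMatchingLineA e xs n).map (· + 1) := by
  induction xs generalizing n with
  | nil => rfl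
  | cons x rest ih =>
    by_cases h : PySem.Str.upper (PySem.Str.strip x) = e <;>
      simp [firstMatchingLineA, h, ih]

theorem main_lemma (e : String) (xs : List String) :
    (match firstMatchingLineA e xs 0 with
     | none => none
     | some index => firstTruthyA (PySem.List.slice xs (some ((index : Int) + 1)) none)) =
    valueAfterGoB e false xs := by
  induction xs with
  | nil => rfl
  | cons x rest ih =>
    by_cases h : PySem.Str.upper (PySem.Str.strip x) = e
    · simp [firstMatchingLineA, valueAfterGoB, h, PySem.List.slice_from_one,
        goB_true_eq_firstTruthy]
    · rw [show (0 : Nat) = 0 from rfl]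
      simp only [firstMatchingLineA, h, firstMatchingLineA_shift]
      rw [valueAfterGoB]
      simp only [if_neg h, Bool.false_eq_true, ↓reduceIte, ← ih]
      cases hfm : firstMatchingLineA e rest 0 with
      | none => simp
      | some j =>
        simp only [Option.map_some]
        have h1 : ((j + 1 : Nat) : Int) + 1 = (((j + 2 : Nat)) : Int) := by push_cast; ring
        have h2 : ((j : Nat) : Int) + 1 = (((j + 1 : Nat)) : Int) := by push_cast; ring
        rw [h1, h2, PySem.List.slice_from_natCast, PySem.List.slice_from_natCast]
        rfl

-- ===== VERDICT (by name: the statement is the Claim_ definition above) =====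
theorem value_after_py_spec : Claim_equal_value_after_py := by
  intro lines label _
  unfold Spec_value_after_py value_after_py value_after_py_alt
  exact main_lemma (PySem.Str.upper label) lines
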